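-- pv_equiv track=rewrite | github.com/TimB25/CoinRiddleProject | GenerateNumbers.py | countUntilHeadAndThenCoin
-- ===== SOURCE A (Python) =====
-- def countUntilHeadAndThenCoin(list_of_coinflips):
--     counter = 0
--     last_coin_flipt = 99
--     for coin in list_of_coinflips:
--         if (last_coin_flipt == 1 and coin == 0):
--             return counter - 1
--         else:
--             last_coin_flipt = coin
--             counter += 1
-- ===== SOURCE B (Python) =====
-- def countUntilHeadAndThenCoin(list_of_coinflips):
--     # Right-to-left sweep: walk the enumerated list backwards, remembering the
--     # element to the right; overwrite the answer on every head-then-tail pair,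
--     # so the final answer is the leftmost one.  No early return.
--     ans = None
--     nxt = None
--     for i, c in reversed(list(enumerate(list_of_coinflips))):
--         if c == 1 and nxt == 0:
--             ans = i
--         nxt = c
--     return ans
-- ===== Notes on version B (the rewrite author's own statement) =====
-- stated objective: alternative
-- what changed: Replaced A's forward scan with stateful last-coin/counter and an early return by a backwards sweep over the reversed enumerated list that remembers the right neighbour and overwrites the answer on every matching pair, so the leftmost match survives and the loop always runs to completion.
import Mathlib
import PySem

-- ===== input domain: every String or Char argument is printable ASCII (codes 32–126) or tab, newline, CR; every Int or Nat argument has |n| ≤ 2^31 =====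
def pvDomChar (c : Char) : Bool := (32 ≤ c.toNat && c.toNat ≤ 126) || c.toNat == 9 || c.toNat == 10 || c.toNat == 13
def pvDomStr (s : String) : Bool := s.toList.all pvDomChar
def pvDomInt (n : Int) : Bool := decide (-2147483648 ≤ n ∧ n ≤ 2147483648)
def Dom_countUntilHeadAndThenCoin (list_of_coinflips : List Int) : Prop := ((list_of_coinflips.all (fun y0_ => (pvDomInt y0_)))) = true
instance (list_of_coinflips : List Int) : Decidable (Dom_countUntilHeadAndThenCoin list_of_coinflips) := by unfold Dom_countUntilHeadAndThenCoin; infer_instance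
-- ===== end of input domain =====

-- B replaces A's forward stateful scan with early return by a backwards sweep over the reversed enumerated list that overwrites the answer so the leftmost match survives; alternative decomposition, same cost.


-- ===== PORT A =====
-- A's loop: counter and last_coin_flipt threaded through a structural recursion, early return on the first match.
def pvGoA : List Int → Int → Int → Option Int
  | [], _, _ => none
  | coin :: rest, counter, last_coin_flipt =>
    if last_coin_flipt = 1 ∧ coin = 0 then some (counter - 1)
    else pvGoA rest (counter + 1) coin

def countUntilHeadAndThenCoin (list_of_coinflips : List Int) : Option Int :=
  pvGoA list_of_coinflips 0 99

-- ===== PORT B =====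
-- B's loop body: state (ans, nxt); on a (1, 0) pair overwrite ans with the index, always record nxt.
def pvStepB (st : Option Int × Option Int) (p : Int × Int) : Option Int × Option Int :=
  (if p.2 = 1 ∧ st.2 = some 0 then some p.1 else st.1, some p.2)

-- B: fold the loop body over reversed(list(enumerate(L))), return ans.
def countUntilHeadAndThenCoin_alt (list_of_coinflips : List Int) : Option Int :=
  (((PySem.List.enumerate list_of_coinflips).reverse).foldl pvStepB (none, none)).1

-- ===== PRECONDITION & SPEC =====
def Spec_countUntilHeadAndThenCoin (list_of_coinflips : List Int) (out : Option Int) : Prop := out = countUntilHeadAndThenCoin_alt list_of_coinflips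
instance (list_of_coinflips : List Int) (out : Option Int) : Decidable (Spec_countUntilHeadAndThenCoin list_of_coinflips out) := by unfold Spec_countUntilHeadAndThenCoin; infer_instance

-- ===== CLAIM =====
def Claim_equal_countUntilHeadAndThenCoin : Prop := ∀ (list_of_coinflips : List Int), Dom_countUntilHeadAndThenCoin list_of_coinflips → Spec_countUntilHeadAndThenCoin list_of_coinflips (countUntilHeadAndThenCoin list_of_coinflips)

-- ===== LEMMAS AND PROOFS =====
-- Common characterisation: index (from i) of the head of the leftmost head-then-tail pair.
def pvF : List Int → Int → Option Int
  | [], _ => none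
  | c :: rest, i => if c = 1 ∧ rest.head? = some 0 then some i else pvF rest (i + 1)

theorem pvGoA_eq (L : List Int) : ∀ (i a : Int),
    pvGoA L i a = if a = 1 ∧ L.head? = some 0 then some (i - 1) else pvF L i := by
  induction L with
  | nil => intro i a; simp [pvGoA, pvF]
  | cons c rest ih =>
    intro i a
    rw [show pvGoA (c :: rest) i a
          = if a = 1 ∧ c = 0 then some (i - 1) else pvGoA rest (i + 1) c from rfl,
        ih (i + 1) c]
    by_cases h : a = 1 ∧ c = 0 <;> simp [h, pvF]

theorem foldB_eq (L : List Int) : ∀ (i : Int),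
    ((PySem.List.enumerate L i).reverse).foldl pvStepB (none, none) = (pvF L i, L.head?) := by
  induction L with
  | nil => intro i; simp [PySem.List.enumerate_nil, pvF]
  | cons c rest ih =>
    intro i
    rw [PySem.List.enumerate_cons, List.reverse_cons, List.foldl_append, ih (i + 1)]
    by_cases h : c = 1 ∧ rest.head? = some 0 <;> simp [pvStepB, pvF, h]

-- ===== VERDICT =====
theorem countUntilHeadAndThenCoin_spec : Claim_equal_countUntilHeadAndThenCoin := by
  intro L _
  unfold Spec_countUntilHeadAndThenCoin countUntilHeadAndThenCoin countUntilHeadAndThenCoin_alt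
  rw [pvGoA_eq, foldB_eq]
  have : ¬ ((99 : Int) = 1 ∧ L.head? = some 0) := by rintro ⟨h, _⟩; norm_num at h
  rw [if_neg this]
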